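-- pv_equiv track=rewrite | github.com/qe-team/marmot | marmot/features/source_word2vec_feature_extractor.py | right_context
-- ===== SOURCE A (Python) =====
-- def right_context(token_list, token, context_size, idx):
--     right_window = []
--     if idx >= len(token_list):
--         return ['_END_' for i in range(context_size)]
--     assert(token_list[idx] == token), "Token in token list: {}, index: {}, token provided in parameters: {}".format(token_list[idx], idx, token)
--     for i in range(idx+1, idx+context_size+1):
--         if i > len(token_list)-1:
--             right_window.append('_END_')
--         else:
--             right_window.append(token_list[i])
--     return right_window
-- ===== SOURCE B (Python) =====
-- def right_context(token_list, token, context_size, idx):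
--     if context_size <= 0:
--         return []
--     if idx >= len(token_list):
--         return ['_END_'] * context_size
--     assert(token_list[idx] == token), "Token in token list: {}, index: {}, token provided in parameters: {}".format(token_list[idx], idx, token)
--     window = token_list[idx + 1 : idx + context_size + 1]
--     window += ['_END_'] * (context_size - len(window))
--     return window
-- ===== Notes on version B (the rewrite author's own statement) =====
-- stated objective: simpler
-- what changed: Replaces A's per-index loop (append '_END_' or token_list[i] for each i in range(idx+1, idx+context_size+1)) by a two-phase slice-plus-pad: take the slice token_list[idx+1:idx+context_size+1] and pad it with '_END_' up to context_size, with a natural empty result for non-positive context_size.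
-- outside the precondition, e.g. on right_context(['a', 'b', 'c'], 'b', 2, -2): A returns ['c', 'a'], B returns ['_END_', '_END_']
import Mathlib
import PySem

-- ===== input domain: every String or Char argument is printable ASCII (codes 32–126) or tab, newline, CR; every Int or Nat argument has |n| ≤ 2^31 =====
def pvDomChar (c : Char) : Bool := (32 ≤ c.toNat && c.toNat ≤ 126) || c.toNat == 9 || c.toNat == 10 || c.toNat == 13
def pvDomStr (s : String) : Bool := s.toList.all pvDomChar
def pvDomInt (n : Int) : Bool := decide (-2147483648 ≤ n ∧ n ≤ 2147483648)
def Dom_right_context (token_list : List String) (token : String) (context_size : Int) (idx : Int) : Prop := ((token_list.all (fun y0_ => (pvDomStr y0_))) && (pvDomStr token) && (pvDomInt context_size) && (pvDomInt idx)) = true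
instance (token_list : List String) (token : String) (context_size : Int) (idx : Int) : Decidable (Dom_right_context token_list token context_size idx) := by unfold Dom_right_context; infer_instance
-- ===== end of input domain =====

-- B replaces A's per-index bounded-append loop by a slice-plus-pad two-phase computation (objective: simpler).


-- ===== PORT A =====
-- token_list[i] in the loop is ported with pyGetD: under Pre_ every i the loop reads is in 0 ≤ i < len, where pyGetD is exact.
-- The failing assert (a raise) is ported as returning []; Pre_ excludes those inputs.
-- pvBody is A's loop body (the bounded read of token_list[i]) as a named helper.
def pvBody (t : List String) (i : Int) : String :=
  if i > (t.length : Int) - 1 then "_END_" else PySem.List.pyGetD t i "_END_"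

def right_context (token_list : List String) (token : String) (context_size : Int) (idx : Int) : List String :=
  if idx ≥ (token_list.length : Int) then
    (PySem.List.pyRange 0 context_size 1).map (fun _ => "_END_")
  else if PySem.List.pyGet? token_list idx ≠ some token then []
  else
    (PySem.List.pyRange (idx + 1) (idx + context_size + 1) 1).foldl
      (fun acc i => acc ++ [pvBody token_list i]) []

-- ===== PORT B =====
-- The failing assert (a raise) is ported as returning []; Pre_ excludes those inputs.
def right_context_alt (token_list : List String) (token : String) (context_size : Int) (idx : Int) : List String :=
  if context_size ≤ 0 then []
  else if idx ≥ (token_list.length : Int) then List.replicate context_size.toNat "_END_"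
  else if PySem.List.pyGet? token_list idx ≠ some token then []
  else
    let window := PySem.List.slice token_list (some (idx + 1)) (some (idx + context_size + 1))
    window ++ List.replicate (context_size - (window.length : Int)).toNat "_END_"

-- ===== PRECONDITION & SPEC =====
-- Pre_ excludes (a) inputs where A raises (idx < -len: IndexError; token_list[idx] ≠ token: AssertionError)
-- and (b) the corner idx ≤ -2 with a wraparound match, where A's negative-index wraparound makes the assert
-- pass on a token near the END of the list and then reads context wrapping from the end to the START of the
-- list — an accidental value neither implementation would be specified to produce.
def Pre_right_context (token_list : List String) (token : String) (context_size : Int) (idx : Int) : Prop :=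
  idx ≥ (token_list.length : Int) ∨ (-1 ≤ idx ∧ PySem.List.pyGet? token_list idx = some token)
instance (token_list : List String) (token : String) (context_size : Int) (idx : Int) : Decidable (Pre_right_context token_list token context_size idx) := by unfold Pre_right_context; infer_instance

def pvWitness_right_context : List String × String × Int × Int := (["a", "b", "c"], "a", 2, 0)

def Spec_right_context (token_list : List String) (token : String) (context_size : Int) (idx : Int) (out : List String) : Prop := out = right_context_alt token_list token context_size idx
instance (token_list : List String) (token : String) (context_size : Int) (idx : Int) (out : List String) : Decidable (Spec_right_context token_list token context_size idx out) := by unfold Spec_right_context; infer_instance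

-- ===== CLAIM (what is proved, stated in full; the proofs are below) =====
def Claim_equal_right_context : Prop := ∀ (token_list : List String) (token : String) (context_size : Int) (idx : Int), Dom_right_context token_list token context_size idx → Pre_right_context token_list token context_size idx → Spec_right_context token_list token context_size idx (right_context token_list token context_size idx)


-- ===== LEMMAS AND PROOFS =====

-- the central fact: A's window over range(a, a+n) equals B's slice-then-pad, for a natural start a
lemma pv_key (t : List String) (a n : Nat) :
    (List.range n).map (fun (k : Nat) => pvBody t ((a : Int) + (k : Int)))
      = ((t.drop a).take n) ++ List.replicate (n - (t.length - a)) "_END_" := by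
  apply List.ext_getElem
  · simp only [List.length_map, List.length_range, List.length_append,
      List.length_take, List.length_drop, List.length_replicate]
    omega
  · intro k h1 h2
    simp only [List.getElem_map, List.getElem_range]
    have hk' : k < n := by simpa using h1
    unfold pvBody
    by_cases hkl : a + k < t.length
    · have hlt : k < ((t.drop a).take n).length := by
        simp only [List.length_take, List.length_drop]
        omega
      rw [List.getElem_append_left hlt]
      rw [if_neg (by omega)]
      rw [PySem.List.pyGetD_eq_getElem t "_END_" (by omega) (by omega)]
      rw [List.getElem_take, List.getElem_drop]
      congr 1
    · have hge : ((t.drop a).take n).length ≤ k := by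
        simp only [List.length_take, List.length_drop]
        omega
      rw [List.getElem_append_right hge, List.getElem_replicate]
      rw [if_pos (by omega)]

-- ===== VERDICT (by name: the statements are the Claim_ definitions above) =====
theorem right_context_spec : Claim_equal_right_context := by
  intro t token cs idx _ hpre
  unfold Spec_right_context right_context right_context_alt
  rcases hpre with hge | ⟨hidx, htok⟩
  · -- idx past the end: both return context_size copies of '_END_'
    by_cases hcs : cs ≤ 0
    · simp only [if_pos hcs, if_pos hge, PySem.List.pyRange_one_eq_nil (show cs ≤ 0 from hcs)]
      simp
    · simp only [if_neg hcs, if_pos hge]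
      rw [PySem.List.pyRange_one]
      rw [List.map_map]
      rw [show ((fun (_ : Int) => "_END_") ∘ fun (k : Nat) => (0 : Int) + (k : Int)) = (fun (_ : Nat) => "_END_") from rfl]
      rw [List.map_const', List.length_range]
      simp
  · -- idx a valid (wraparound-free up to -1) index whose token matches
    have hlt : ¬ idx ≥ (t.length : Int) := by
      intro h
      have hnone : PySem.List.pyGet? t idx = none :=
        (PySem.List.pyGet?_eq_none_iff t idx).mpr (by unfold PySem.Raise.InRange; omega)
      rw [hnone] at htok
      simp at htok
    have htok' : ¬ (PySem.List.pyGet? t idx ≠ some token) := by simp [htok]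
    by_cases hcs : cs ≤ 0
    · simp only [if_pos hcs, if_neg hlt, if_neg htok',
        PySem.List.pyRange_one_eq_nil (show idx + cs + 1 ≤ idx + 1 by omega)]
      simp
    · simp only [if_neg hcs, if_neg hlt, if_neg htok']
      rw [PySem.List.foldl_append_singleton_eq_map]
      rw [PySem.List.pyRange_one]
      obtain ⟨a, ha⟩ : ∃ a : Nat, (a : Int) = idx + 1 := ⟨(idx + 1).toNat, by omega⟩
      obtain ⟨n, hn⟩ : ∃ n : Nat, (n : Int) = cs := ⟨cs.toNat, by omega⟩
      have hrange : (idx + cs + 1 - (idx + 1)).toNat = n := by omega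
      rw [hrange, List.nil_append]
      have hslice : PySem.List.slice t (some (idx + 1)) (some (idx + cs + 1))
          = (t.drop a).take n := by
        rw [PySem.List.slice_toNat t (by omega) (by omega)]
        rw [show (idx + cs + 1).toNat - (idx + 1).toNat = n from by omega]
        rw [show (idx + 1).toNat = a from by omega]
      rw [hslice]
      have hinner : List.map (fun k : Nat => idx + 1 + (k : Int)) (List.range n)
          = List.map (fun k : Nat => ((a : Int) + (k : Int))) (List.range n) :=
        List.map_congr_left (fun k _ => by rw [ha])
      rw [hinner, List.map_map, Function.comp_def, pv_key t a n]
      congr 1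
      simp only [List.length_take, List.length_drop]
      congr 1
      push_cast
      omega
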